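-- pv_equiv track=rewrite | github.com/braingeneers/midbrain_parkinsons | midbrain/human_hip/spike_data/plot_functional_connectivity_map.py | get_in_out_degree
-- ===== SOURCE A (Python) =====
-- def get_in_out_degree( mean_latency_matrix ):
--     """
--     Output: Returns a list of tuples, [(incoming,outgoing),....] , containing the in and out degree for each neuron.
--             This is the number of "receicer" and "sender" signals the neurons get from other neurons
--     Input: mean_latency_matrix- A list of lists containing the mean latency between all neurons
--     """
--     in_out_deg = [(0, 0) for _ in range(len(mean_latency_matrix))]
--     for curr_neuron in range(len(mean_latency_matrix)):
--         in_deg = 0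
--         out_deg = 0
--         curr_neural_latencies = mean_latency_matrix[curr_neuron]
--         for i in range(len(curr_neural_latencies)):
--             if curr_neural_latencies[i] > 0:
--                 out_deg += 1
--             if curr_neural_latencies[i] < 0:
--                 in_deg += 1
--         in_out_deg[curr_neuron] = (in_deg, out_deg)
--     return in_out_deg
-- ===== SOURCE B (Python) =====
-- def _count_below(a, x, strict):
--     """Binary search on sorted list a: number of elements < x (strict) or <= x."""
--     lo, hi = 0, len(a)
--     while lo < hi:
--         mid = (lo + hi) // 2
--         v = a[mid]
--         if (v < x) if strict else (v <= x):
--             lo = mid + 1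
--         else:
--             hi = mid
--     return lo
--
--
-- def get_in_out_degree(mean_latency_matrix):
--     degrees = []
--     for row in mean_latency_matrix:
--         srt = sorted(row)
--         neg = _count_below(srt, 0, True)
--         pos = len(srt) - _count_below(srt, 0, False)
--         degrees.append((neg, pos))
--     return degrees
-- ===== Notes on version B (the rewrite author's own statement) =====
-- stated objective: alternative
-- what changed: Instead of a combined linear counting pass per row, B sorts each row and locates the negative/positive boundaries of the sorted row by binary search (bisect-left/right of 0), deriving the counts from the boundary indices.
import Mathlib
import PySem

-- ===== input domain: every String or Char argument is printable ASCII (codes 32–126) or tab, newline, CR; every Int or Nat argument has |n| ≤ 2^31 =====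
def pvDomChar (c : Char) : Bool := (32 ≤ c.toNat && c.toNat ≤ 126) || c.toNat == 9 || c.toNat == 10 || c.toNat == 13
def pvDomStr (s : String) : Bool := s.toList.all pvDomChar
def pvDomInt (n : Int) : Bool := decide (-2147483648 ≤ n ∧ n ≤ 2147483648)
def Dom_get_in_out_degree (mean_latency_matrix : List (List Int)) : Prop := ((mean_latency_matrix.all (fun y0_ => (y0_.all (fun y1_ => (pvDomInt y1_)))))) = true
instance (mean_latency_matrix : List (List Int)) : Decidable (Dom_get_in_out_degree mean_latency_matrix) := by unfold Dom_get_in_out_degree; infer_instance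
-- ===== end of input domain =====

-- B replaces A's combined linear counting pass with sort + hand-written binary
-- search for the negative/positive boundaries of each sorted row (alternative
-- algorithm; same result, not claimed faster).

-- ===== PORT A =====
-- inner index loop over one row: in_deg/out_deg accumulated as a pair (in_deg, out_deg)
def pvInnerA (row : List Int) : Int × Int :=
  (PySem.List.pyRange 0 (PySem.List.len row) 1).foldl
    (fun (p : Int × Int) i =>
      let v := PySem.List.pyGetD row i 0
      let p1 := if v > 0 then (p.1, p.2 + 1) else p
      if v < 0 then (p1.1 + 1, p1.2) else p1)
    (0, 0)

def get_in_out_degree (mean_latency_matrix : List (List Int)) : List (Int × Int) :=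
  let in_out_deg := (List.range mean_latency_matrix.length).map (fun _ => ((0 : Int), (0 : Int)))
  (PySem.List.pyRange 0 (PySem.List.len mean_latency_matrix) 1).foldl
    (fun acc curr =>
      let row := PySem.List.pyGetD mean_latency_matrix curr []
      acc.set curr.toNat (pvInnerA row))
    in_out_deg

-- ===== PORT B =====
-- the comparison of Source B's _count_below: (v < x) if strict else (v <= x)
def pvBelow (strict : Bool) (v x : Int) : Bool :=
  if strict then decide (v < x) else decide (v ≤ x)

-- Source B's _count_below while-loop; lo/hi stay non-negative in Python, so Nat with
-- Nat division '/' is exact for Python's '//' here; a[mid] is always in range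
-- (lo ≤ mid < hi ≤ len a), so getD's default is never used.
def pvCountBelow (a : List Int) (x : Int) (strict : Bool) (lo hi : Nat) : Nat :=
  if lo < hi then
    let mid := (lo + hi) / 2
    if pvBelow strict (a.getD mid 0) x then pvCountBelow a x strict (mid + 1) hi
    else pvCountBelow a x strict lo mid
  else lo
termination_by hi - lo
decreasing_by all_goals omega

def get_in_out_degree_alt (mean_latency_matrix : List (List Int)) : List (Int × Int) :=
  mean_latency_matrix.map (fun row =>
    let srt := PySem.List.sorted row (fun v => v) false
    let neg := pvCountBelow srt 0 true 0 srt.length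
    let pos := (srt.length : Int) - (pvCountBelow srt 0 false 0 srt.length : Int)
    ((neg : Int), pos))

-- ===== PRECONDITION & SPEC =====
def Spec_get_in_out_degree (mean_latency_matrix : List (List Int)) (out : List (Int × Int)) : Prop := out = get_in_out_degree_alt mean_latency_matrix
instance (mean_latency_matrix : List (List Int)) (out : List (Int × Int)) : Decidable (Spec_get_in_out_degree mean_latency_matrix out) := by unfold Spec_get_in_out_degree; infer_instance

-- ===== CLAIM (what is proved, stated in full; the proofs are below) =====
def Claim_equal_get_in_out_degree : Prop := ∀ (mean_latency_matrix : List (List Int)), Dom_get_in_out_degree mean_latency_matrix → Spec_get_in_out_degree mean_latency_matrix (get_in_out_degree mean_latency_matrix)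

-- ===== LEMMAS AND PROOFS =====

-- A's inner fold, started from any accumulator, adds the two counts
theorem pvInnerA_fold (row : List Int) (a b : Int) :
    row.foldl
      (fun (p : Int × Int) v =>
        let p1 := if v > 0 then (p.1, p.2 + 1) else p
        if v < 0 then (p1.1 + 1, p1.2) else p1)
      (a, b)
    = (a + (row.countP (fun v => v < 0) : Nat), b + (row.countP (fun v => v > 0) : Nat)) := by
  induction row generalizing a b with
  | nil => simp
  | cons x xs ih =>
    simp only [List.foldl_cons, List.countP_cons]
    by_cases hp : x > 0 <;> by_cases hn : x < 0 <;>
      simp [hp, hn, ih] <;> omega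

theorem pvInnerA_eq (row : List Int) :
    pvInnerA row = (((row.countP (fun v => v < 0) : Nat) : Int),
                    ((row.countP (fun v => v > 0) : Nat) : Int)) := by
  unfold pvInnerA
  rw [PySem.List.foldl_pyRange_zero_pyGetD row 0
        (fun (p : Int × Int) v =>
          let p1 := if v > 0 then (p.1, p.2 + 1) else p
          if v < 0 then (p1.1 + 1, p1.2) else p1) (0, 0)]
  simp [pvInnerA_fold row 0 0]

-- the outer fold processed up to index b overwrites the first b slots with g m[i]
theorem pvOuter_fold (m : List (List Int)) (g : List Int → Int × Int)
    (init : List (Int × Int)) (hlen : init.length = m.length)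
    (b : Nat) (hb : b ≤ m.length) :
    (PySem.List.pyRange 0 (b : Int) 1).foldl
      (fun acc curr => acc.set curr.toNat (g (PySem.List.pyGetD m curr [])))
      init
    = (m.take b).map g ++ init.drop b := by
  induction b with
  | zero => simp [PySem.List.pyRange_one_eq_nil]
  | succ b ih =>
    have hb' : b ≤ m.length := Nat.le_of_succ_le hb
    have hlt : b < m.length := hb
    have hsplit : PySem.List.pyRange 0 ((b : Int) + 1) 1
        = PySem.List.pyRange 0 (b : Int) 1 ++ [(b : Int)] :=
      PySem.List.pyRange_one_succ_right (Int.natCast_nonneg b)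
    rw [show ((b + 1 : Nat) : Int) = (b : Int) + 1 by push_cast; ring,
        hsplit, List.foldl_append, ih hb']
    simp only [List.foldl_cons, List.foldl_nil, Int.toNat_natCast]
    have hget : PySem.List.pyGetD m (b : Int) [] = m[b] := by
      rw [PySem.List.pyGetD_natCast]
      simp [List.getD, hlt]
    have hlen' : ((m.take b).map g).length = b := by
      simp [List.length_take, Nat.min_eq_left hb']
    have hdrop : init.drop b = init[b] :: init.drop (b + 1) := by
      rw [List.drop_eq_getElem_cons (by omega)]
    rw [hget, hdrop, List.set_append_right _ _ (by omega)]
    simp only [hlen', Nat.sub_self, List.set_cons_zero]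
    rw [List.take_succ_eq_append_getElem (l := m) hlt, List.map_append]
    simp

-- the predicate 'pvBelow s · x' is downward closed along a sorted list
theorem pvBelow_mono (a : List Int) (x : Int) (s : Bool)
    (hs : a.Pairwise (· ≤ ·)) {i j : Nat} (hij : i ≤ j) (hj : j < a.length)
    (h : pvBelow s (a.getD j 0) x = true) :
    pvBelow s (a.getD i 0) x = true := by
  have hij' : a[i]'(lt_of_le_of_lt hij hj) ≤ a[j] := by
    rcases Nat.lt_or_ge i j with hlt | hge
    · exact List.pairwise_iff_getElem.mp hs i j _ hj hlt
    · have : i = j := le_antisymm hij hge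
      subst this; exact le_refl _
  have hi : i < a.length := lt_of_le_of_lt hij hj
  simp only [List.getD_eq_getElem?_getD, List.getElem?_eq_getElem hi,
    List.getElem?_eq_getElem hj, Option.getD_some] at *
  cases s <;> simp [pvBelow] at * <;> omega

-- invariant of the binary search: its result r satisfies a[i] below x ↔ i < r
theorem pvCountBelow_inv (a : List Int) (x : Int) (s : Bool)
    (hs : a.Pairwise (· ≤ ·)) :
    ∀ (lo hi : Nat), hi ≤ a.length → lo ≤ hi →
    (∀ i, i < lo → pvBelow s (a.getD i 0) x = true) →
    (∀ i, hi ≤ i → i < a.length → pvBelow s (a.getD i 0) x = false) →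
    (pvCountBelow a x s lo hi ≤ a.length ∧
     ∀ i, i < a.length → (pvBelow s (a.getD i 0) x = true ↔ i < pvCountBelow a x s lo hi)) := by
  intro lo hi
  induction lo, hi using pvCountBelow.induct a x s with
  | case1 lo hi hlh mid hbel ih =>
    intro hhi hle hlo hhif
    rw [pvCountBelow, if_pos hlh]
    simp only [show (lo + hi) / 2 = mid from rfl, if_pos hbel]
    refine ih (by omega) (by omega) ?_ hhif
    intro i hi'
    exact pvBelow_mono a x s hs (by omega) (by omega) hbel
  | case2 lo hi hlh mid hbel ih =>
    intro hhi hle hlo hhif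
    rw [pvCountBelow, if_pos hlh]
    simp only [show (lo + hi) / 2 = mid from rfl, if_neg hbel]
    refine ih (by omega) (by omega) hlo ?_
    intro i hmi hil
    rcases Nat.eq_or_lt_of_le hmi with heq | hlt
    · subst heq; exact Bool.eq_false_iff.mpr hbel
    · by_contra hc
      have := pvBelow_mono a x s hs (Nat.le_of_lt hlt) hil
        (Bool.not_eq_false _ |>.mp hc)
      rw [this] at hbel; exact hbel rfl
  | case3 lo hi hlh =>
    intro hhi hle hlo hhif
    rw [pvCountBelow, if_neg hlh]
    have : lo = hi := by omega
    subst this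
    refine ⟨hhi, fun i hil => ⟨?_, fun h => hlo i h⟩⟩
    intro ht
    by_contra hc
    have := hhif i (by omega) hil
    rw [ht] at this; exact Bool.true_eq_false.mp this

-- a predicate true exactly on the first r positions has count r
theorem countP_of_prefix (a : List Int) (p : Int → Bool) (r : Nat) (hr : r ≤ a.length)
    (h : ∀ i, i < a.length → (p (a.getD i 0) = true ↔ i < r)) :
    a.countP p = r := by
  have hsplit : a = a.take r ++ a.drop r := (List.take_append_drop r a).symm
  have h1 : (a.take r).countP p = (a.take r).length := by
    rw [List.countP_eq_length]
    intro v hv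
    obtain ⟨i, hi, hvi⟩ := List.getElem_of_mem hv
    rw [List.length_take] at hi
    have hil : i < a.length := by omega
    have : a.getD i 0 = v := by
      rw [List.getD_eq_getElem?_getD, List.getElem?_eq_getElem hil, Option.getD_some]
      rw [← hvi, List.getElem_take]
    rw [← this]
    exact (h i hil).mpr (by omega)
  have h2 : (a.drop r).countP p = 0 := by
    rw [List.countP_eq_zero]
    intro v hv
    obtain ⟨i, hi, hvi⟩ := List.getElem_of_mem hv
    rw [List.length_drop] at hi
    have hil : r + i < a.length := by omega
    have hv' : a.getD (r + i) 0 = v := by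
      rw [List.getD_eq_getElem?_getD, List.getElem?_eq_getElem hil, Option.getD_some]
      rw [← hvi, List.getElem_drop]
    intro hp
    have := (h (r + i) hil).mp (by rw [hv']; exact hp)
    omega
  calc a.countP p = (a.take r ++ a.drop r).countP p := by rw [← hsplit]
    _ = r := by
        rw [List.countP_append, h1, h2, List.length_take]
        omega

-- binary search on the sorted row counts exactly the elements below x
theorem pvCountBelow_eq (row : List Int) (x : Int) (s : Bool) :
    pvCountBelow (PySem.List.sorted row (fun v => v) false) x s 0
        (PySem.List.sorted row (fun v => v) false).length
      = row.countP (fun v => pvBelow s v x) := by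
  set a := PySem.List.sorted row (fun v => v) false with ha
  have hs : a.Pairwise (· ≤ ·) := PySem.List.sorted_pairwise row (fun v => v)
  obtain ⟨hle, hiff⟩ := pvCountBelow_inv a x s hs 0 a.length (le_refl _) (Nat.zero_le _)
    (fun i hi => absurd hi (Nat.not_lt_zero i))
    (fun i hi hil => absurd hil (by omega))
  have hcount : a.countP (fun v => pvBelow s v x) = pvCountBelow a x s 0 a.length :=
    countP_of_prefix a _ _ hle hiff
  have hperm : a.Perm row := PySem.List.sorted_perm row (fun v => v) false
  rw [← hperm.countP_eq, hcount]

-- ===== VERDICT (by name: the statement is the Claim_ definition above) =====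
theorem get_in_out_degree_spec : Claim_equal_get_in_out_degree := by
  intro m _
  unfold Spec_get_in_out_degree get_in_out_degree get_in_out_degree_alt
  have hlen : ((List.range m.length).map (fun _ => ((0 : Int), (0 : Int)))).length = m.length := by
    simp
  have h := pvOuter_fold m pvInnerA
      ((List.range m.length).map (fun _ => ((0 : Int), (0 : Int)))) hlen m.length (le_refl _)
  simp only [PySem.List.len_eq] at *
  rw [h]
  have hnil : ((List.range m.length).map (fun _ => ((0 : Int), (0 : Int)))).drop m.length = [] := by
    simp
  rw [List.take_length, hnil, List.append_nil]
  refine List.map_congr_left (fun row _ => ?_)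
  rw [pvInnerA_eq]
  have hlenr : (PySem.List.sorted row (fun v => v) false).length = row.length :=
    PySem.List.length_sorted row (fun v => v) false
  have e1 : pvCountBelow (PySem.List.sorted row (fun v => v) false) 0 true 0
      (PySem.List.sorted row (fun v => v) false).length
      = row.countP (fun v => decide (v < 0)) := by
    simpa [pvBelow] using pvCountBelow_eq row 0 true
  have e2 : pvCountBelow (PySem.List.sorted row (fun v => v) false) 0 false 0
      (PySem.List.sorted row (fun v => v) false).length
      = row.countP (fun v => decide (v ≤ 0)) := by
    simpa [pvBelow] using pvCountBelow_eq row 0 false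
  rw [e1, e2, hlenr]
  simp only [Prod.mk.injEq]
  refine ⟨by trivial, ?_⟩
  have hsum : row.countP (fun v => decide (v ≤ 0)) + row.countP (fun v => decide (0 < v))
      = row.length := by
    have h0 := List.length_eq_countP_add_countP (l := row) (p := fun v => decide (v ≤ 0))
    rw [h0]
    have h1 : row.countP (fun a => decide (¬ decide (a ≤ 0) = true))
        = row.countP (fun v => decide (0 < v)) :=
      List.countP_congr (fun v _ => by by_cases hv : v ≤ 0 <;> simp [hv] <;> omega)
    omega
  have hgt : row.countP (fun v => v > 0) = row.countP (fun v => decide (0 < v)) := rfl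
  rw [hgt]
  omega
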